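-- pv_equiv track=rewrite | github.com/lastivika/ComputerProjectDescreteMath | isomorfism.py | check_edges
-- ===== SOURCE A (Python) =====
-- def check_edges(graph1: dict, graph2: dict) -> bool:
--     edges_list1 = []
--     edges_list2 = []
--     for key in graph1.keys():
--         for vertex in graph1[key]:
--             edges_list1.append((key, vertex))
--
--     for key in graph2.keys():
--         for vertex in graph2[key]:
--             edges_list2.append((key, vertex))
--
--     return len(set(edges_list1)) == len(set(edges_list2))
-- ===== SOURCE B (Python) =====
-- def check_edges(graph1: dict, graph2: dict) -> bool:
--     def distinct_edges(graph):
--         edges = sorted((key, vertex) for key in graph for vertex in graph[key])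
--         count = 0
--         prev = None
--         for e in edges:
--             if prev is None or e != prev:
--                 count += 1
--             prev = e
--         return count
--     return distinct_edges(graph1) == distinct_edges(graph2)
-- ===== Notes on version B (the rewrite author's own statement) =====
-- stated objective: alternative
-- what changed: B counts each graph's distinct edges by comparison-sorting the (key, vertex) pairs and scanning the sorted list counting run boundaries (element != predecessor), instead of A's hash-set deduplication of two materialised edge lists; correct because sorting makes equal edges adjacent.
import Mathlib
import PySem

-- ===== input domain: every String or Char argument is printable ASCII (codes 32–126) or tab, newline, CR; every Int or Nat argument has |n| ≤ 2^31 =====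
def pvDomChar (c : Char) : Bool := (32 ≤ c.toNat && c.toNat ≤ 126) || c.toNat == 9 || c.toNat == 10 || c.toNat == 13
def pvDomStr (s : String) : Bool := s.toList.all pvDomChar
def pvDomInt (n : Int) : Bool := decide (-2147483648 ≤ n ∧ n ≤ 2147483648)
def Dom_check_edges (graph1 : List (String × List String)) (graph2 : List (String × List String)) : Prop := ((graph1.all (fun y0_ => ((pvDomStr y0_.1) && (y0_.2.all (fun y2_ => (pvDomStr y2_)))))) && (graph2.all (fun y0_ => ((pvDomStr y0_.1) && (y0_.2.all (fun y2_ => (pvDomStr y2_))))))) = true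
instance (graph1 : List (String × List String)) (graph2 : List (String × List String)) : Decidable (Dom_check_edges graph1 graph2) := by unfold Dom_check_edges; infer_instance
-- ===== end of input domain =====

-- B counts each graph's distinct edges by comparison-sorting the (key, vertex) pairs and
-- counting run boundaries in one scan, instead of A's hash-set deduplication of two edge lists.

-- ===== PORT A =====
-- the dict argument arrives as an association list; the dict A iterates is PySem.Dict.ofList of it
def pvEdgesA (d : PySem.Dict String (List String)) : List (String × String) :=
  (PySem.Dict.keys d).foldl
    (fun acc k => (PySem.Dict.getD d k []).foldl (fun acc2 v => acc2 ++ [(k, v)]) acc) []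

def check_edges (graph1 : List (String × List String)) (graph2 : List (String × List String)) : Bool :=
  let edges_list1 := pvEdgesA (PySem.Dict.ofList graph1)
  let edges_list2 := pvEdgesA (PySem.Dict.ofList graph2)
  PySem.Set.len (PySem.Set.ofList edges_list1) == PySem.Set.len (PySem.Set.ofList edges_list2)

-- ===== PORT B =====
-- sorted((key, vertex) for key in graph for vertex in graph[key]); default tuple key = sorted2 fst snd
def pvSortedEdgesB (d : PySem.Dict String (List String)) : List (String × String) :=
  PySem.List.sorted2
    ((PySem.Dict.keys d).flatMap (fun k => (PySem.Dict.getD d k []).map (fun v => (k, v))))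
    Prod.fst Prod.snd

-- the scan: state (count, prev); 'if prev is None or e != prev: count += 1; prev = e'
def pvDistinctB (d : PySem.Dict String (List String)) : Int :=
  ((pvSortedEdgesB d).foldl
    (fun (s : Int × Option (String × String)) e =>
      (if s.2 = some e then s.1 else s.1 + 1, some e)) (0, none)).1

def check_edges_alt (graph1 : List (String × List String)) (graph2 : List (String × List String)) : Bool :=
  pvDistinctB (PySem.Dict.ofList graph1) == pvDistinctB (PySem.Dict.ofList graph2)

-- ===== PRECONDITION & SPEC =====
def Spec_check_edges (graph1 : List (String × List String)) (graph2 : List (String × List String)) (out : Bool) : Prop := out = check_edges_alt graph1 graph2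
instance (graph1 : List (String × List String)) (graph2 : List (String × List String)) (out : Bool) : Decidable (Spec_check_edges graph1 graph2 out) := by unfold Spec_check_edges; infer_instance

-- ===== CLAIM (what is proved, stated in full; the proofs are below) =====
def Claim_equal_check_edges : Prop := ∀ (graph1 : List (String × List String)) (graph2 : List (String × List String)), Dom_check_edges graph1 graph2 → Spec_check_edges graph1 graph2 (check_edges graph1 graph2)

-- ===== LEMMAS AND PROOFS =====

-- the number of distinct elements of a list is its toFinset's cardinality
theorem pvSetLen_eq {α : Type} [BEq α] [LawfulBEq α] [DecidableEq α] (xs : List α) :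
    (PySem.Set.ofList xs).length = xs.toFinset.card := by
  have h1 : (PySem.Set.ofList xs).Perm xs.dedup := by
    rw [List.perm_ext_iff_of_nodup (PySem.Set.nodup_ofList xs) xs.nodup_dedup]
    intro a; simp [PySem.Set.mem_ofList, List.mem_dedup]
  rw [List.card_toFinset, h1.length_eq]

-- the strict 'before' test sorted2 fst snd sorts by (Python's lexicographic tuple <)
def pvLexLt (a b : String × String) : Bool :=
  decide (a.1 < b.1) || (!decide (b.1 < a.1) && decide (a.2 < b.2))

theorem pvLexLe_iff (a b : String × String) :
    pvLexLt b a = false ↔ a.1 ≤ b.1 ∧ (a.1 < b.1 ∨ a.2 ≤ b.2) := by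
  unfold pvLexLt
  simp only [Bool.or_eq_false_iff, Bool.and_eq_false_iff, Bool.not_eq_eq_eq_not, Bool.not_false,
    decide_eq_false_iff_not, decide_eq_true_eq, not_lt]

theorem pvLexLt_asymm (a b : String × String) (h : pvLexLt a b = true) : pvLexLt b a = false := by
  rw [pvLexLe_iff]
  unfold pvLexLt at h
  simp only [Bool.or_eq_true, Bool.and_eq_true, Bool.not_eq_eq_eq_not, Bool.not_true,
    decide_eq_false_iff_not, decide_eq_true_eq, not_lt] at h
  rcases h with h | ⟨h1, h2⟩
  · exact ⟨h.le, Or.inl h⟩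
  · rcases eq_or_lt_of_le h1 with h' | h'
    · exact ⟨h1, Or.inr h2.le⟩
    · exact ⟨h1, Or.inl h'⟩

theorem pvLexLe_trans (a b c : String × String)
    (hab : pvLexLt b a = false) (hbc : pvLexLt c b = false) : pvLexLt c a = false := by
  rw [pvLexLe_iff] at *
  obtain ⟨h1, h2⟩ := hab
  obtain ⟨h3, h4⟩ := hbc
  refine ⟨le_trans h1 h3, ?_⟩
  rcases h2 with h | h
  · exact Or.inl (lt_of_lt_of_le h h3)
  · rcases h4 with h' | h'
    · exact Or.inl (lt_of_le_of_lt h1 h')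
    · exact Or.inr (le_trans h h')

theorem pvLexLe_antisymm (a b : String × String)
    (hab : pvLexLt b a = false) (hba : pvLexLt a b = false) : a = b := by
  rw [pvLexLe_iff] at *
  have h1 : a.1 = b.1 := le_antisymm hab.1 hba.1
  have h2 : a.2 = b.2 := by
    rcases hab.2 with h | h
    · exact absurd h1 h.ne
    · rcases hba.2 with h' | h'
      · exact absurd h1.symm h'.ne
      · exact le_antisymm h h'
  exact Prod.ext h1 h2

-- PySem.List.insertBy under the strict test pvLexLt preserves being sorted (Pairwise lex-≤)
theorem pvInsertBy_pairwise (x : String × String) (l : List (String × String))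
    (h : l.Pairwise (fun a b => pvLexLt b a = false)) :
    (PySem.List.insertBy pvLexLt x l).Pairwise (fun a b => pvLexLt b a = false) := by
  induction l with
  | nil => simp [PySem.List.insertBy]
  | cons y ys ih =>
    rw [List.pairwise_cons] at h
    obtain ⟨h1, h2⟩ := h
    show (if pvLexLt x y = true then x :: y :: ys else y :: PySem.List.insertBy pvLexLt x ys).Pairwise _
    by_cases hxy : pvLexLt x y = true
    · rw [if_pos hxy]
      refine List.pairwise_cons.mpr ⟨?_, List.pairwise_cons.mpr ⟨h1, h2⟩⟩
      intro z hz
      rcases List.mem_cons.mp hz with hzy | hz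
      · rw [hzy]; exact pvLexLt_asymm x y hxy
      · exact pvLexLe_trans x y z (pvLexLt_asymm x y hxy) (h1 z hz)
    · rw [if_neg hxy]
      refine List.pairwise_cons.mpr ⟨?_, ih h2⟩
      intro z hz
      rcases (PySem.List.mem_insertBy pvLexLt x z ys).mp hz with rfl | hz
      · exact Bool.eq_false_iff.mpr hxy
      · exact h1 z hz

theorem pvFoldlInsert_pairwise (xs : List (String × String)) (acc : List (String × String))
    (h : acc.Pairwise (fun a b => pvLexLt b a = false)) :
    (xs.foldl (fun acc x => PySem.List.insertBy pvLexLt x acc) acc).Pairwise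
      (fun a b => pvLexLt b a = false) := by
  induction xs generalizing acc with
  | nil => exact h
  | cons x xs ih => exact ih _ (pvInsertBy_pairwise x acc h)

-- cardinality step used by the run-boundary scan
theorem pvCardInsert (e : String × String) (X : Finset (String × String)) :
    (insert e X).card = (X \ {e}).card + 1 := by
  have h : insert e X = insert e (X \ {e}) := by
    ext a; simp [Finset.mem_insert, Finset.mem_sdiff]; tauto
  rw [h, Finset.card_insert_of_notMem (by simp)]

-- the scan over a sorted tail, with prev = some p and every element lex-≥ p
theorem pvScan_aux (l : List (String × String)) (c : Int) (p : String × String)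
    (hp : l.Pairwise (fun a b => pvLexLt b a = false))
    (hz : ∀ z ∈ l, pvLexLt z p = false) :
    (l.foldl (fun (s : Int × Option (String × String)) e =>
        (if s.2 = some e then s.1 else s.1 + 1, some e)) (c, some p)).1
      = c + ((l.toFinset \ {p}).card : Int) := by
  induction l generalizing c p with
  | nil => simp
  | cons e rest ih =>
    rw [List.pairwise_cons] at hp
    obtain ⟨h1, h2⟩ := hp
    have step : (rest.foldl (fun (s : Int × Option (String × String)) e =>
        (if s.2 = some e then s.1 else s.1 + 1, some e))
          ((if p = e then c else c + 1), some e)).1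
        = (if p = e then c else c + 1) + ((rest.toFinset \ {e}).card : Int) :=
      ih _ _ h2 h1
    by_cases hpe : p = e
    · subst hpe
      simpa [step, List.toFinset_cons,
        Finset.insert_sdiff_of_mem _ (Finset.mem_singleton_self p)] using step
    · have hpmem : p ∉ insert e rest.toFinset := by
        intro hmem
        rcases Finset.mem_insert.mp hmem with rfl | hmem
        · exact hpe rfl
        · exact hpe (pvLexLe_antisymm p e (hz e (by simp))
            (h1 p (List.mem_toFinset.mp hmem)))
      have hsd : (insert e rest.toFinset) \ {p} = insert e rest.toFinset := by
        ext a
        simp only [Finset.mem_sdiff, Finset.mem_singleton]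
        refine ⟨fun h => h.1, fun h => ⟨h, fun hap => hpmem (hap ▸ h)⟩⟩
      simp only [List.foldl_cons, List.toFinset_cons, hsd, Option.some.injEq, if_neg hpe]
      rw [if_neg hpe] at step
      rw [step, pvCardInsert]
      push_cast
      ring

-- the full scan counts the distinct elements of a sorted list
theorem pvScan_sorted (l : List (String × String))
    (h : l.Pairwise (fun a b => pvLexLt b a = false)) :
    (l.foldl (fun (s : Int × Option (String × String)) e =>
        (if s.2 = some e then s.1 else s.1 + 1, some e)) (0, none)).1
      = (l.toFinset.card : Int) := by
  cases l with
  | nil => simp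
  | cons e rest =>
    rw [List.pairwise_cons] at h
    obtain ⟨h1, h2⟩ := h
    have := pvScan_aux rest 1 e h2 h1
    simp only [List.foldl_cons, List.toFinset_cons, reduceCtorEq, if_false]
    rw [show (0 : Int) + 1 = 1 by ring, this, pvCardInsert]
    push_cast
    ring

-- A's nested append loop builds the flatMap of per-key (key, vertex) lists
theorem pvEdgesA_eq (d : PySem.Dict String (List String)) :
    pvEdgesA d = (PySem.Dict.keys d).flatMap
      (fun k => (PySem.Dict.getD d k []).map (fun v => (k, v))) := by
  unfold pvEdgesA
  have hbody : (fun (acc : List (String × String)) k =>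
      (PySem.Dict.getD d k []).foldl (fun acc2 v => acc2 ++ [(k, v)]) acc)
      = fun acc k => acc ++ (PySem.Dict.getD d k []).map (fun v => (k, v)) := by
    funext acc k
    exact PySem.List.foldl_append_singleton_eq_map (f := fun v => (k, v)) ..
  rw [hbody, PySem.List.foldl_append_eq_flatMap]
  simp

-- B's sorted2 call is the insertBy fold under pvLexLt
theorem pvSorted2_eq (xs : List (String × String)) :
    PySem.List.sorted2 xs Prod.fst Prod.snd
      = xs.foldl (fun acc x => PySem.List.insertBy pvLexLt x acc) [] := rfl

-- per dict: A's distinct count (as an Int) and B's run-boundary count agree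
theorem pvPerDict (d : PySem.Dict String (List String)) :
    PySem.Set.len (PySem.Set.ofList (pvEdgesA d)) = pvDistinctB d := by
  unfold pvDistinctB pvSortedEdgesB
  rw [pvSorted2_eq, ← pvSorted2_eq]
  rw [pvScan_sorted _ (by rw [pvSorted2_eq]; exact pvFoldlInsert_pairwise _ [] (by simp))]
  rw [List.toFinset_eq_of_perm _ _ (PySem.List.sorted2_perm _ Prod.fst Prod.snd false)]
  rw [← pvEdgesA_eq]
  simp [PySem.Set.len, pvSetLen_eq]

-- ===== VERDICT (by name: the statement is the Claim_ definition above) =====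
theorem check_edges_spec : Claim_equal_check_edges := by
  intro graph1 graph2 _
  unfold Spec_check_edges check_edges check_edges_alt
  simp only [pvPerDict]
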